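-- pv_equiv track=rewrite | github.com/ontologymerging/NoisyOntologyMerging | MergingNoisyOntology_Semantic-Based/ModelBasedMerging.py | Collecting_AtomicConceptsFrom_AllSources
-- ===== SOURCE A (Python) =====
-- def Collecting_AtomicConceptsFrom_AllSources(ListOfSources):
--     ListOfAtomicConcepts=[]
--     #Relation=[["->"],["<-"],["="]]
--     Relation = ["->","<-","="]
--     for eachSource in ListOfSources:
--         for eachAxiom in eachSource:
--             for eachConcept in eachAxiom:
--                 if eachConcept not in Relation:
--                     ListOfAtomicConcepts.append(eachConcept)
--     ListOfAtomicConcepts = list(dict.fromkeys(ListOfAtomicConcepts))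
--     return ListOfAtomicConcepts
-- ===== SOURCE B (Python) =====
-- def Collecting_AtomicConceptsFrom_AllSources(ListOfSources):
--     # Flatten with the relation filter inline, then deduplicate by repeatedly
--     # taking the head and stripping all its later occurrences from the rest.
--     # No hash set / dict: duplicates are removed ahead of time.
--     flat = [c for src in ListOfSources for ax in src for c in ax
--             if c not in ("->", "<-", "=")]
--     out = []
--     while flat:
--         head = flat[0]
--         out.append(head)
--         flat = [x for x in flat[1:] if x != head]
--     return out
-- ===== Notes on version B (the rewrite author's own statement) =====
-- stated objective: alternative
-- what changed: A appends every non-relation concept and then deduplicates with a hash-based dict.fromkeys pass; B flattens with the filter inline and deduplicates without any hash container, by repeatedly taking the head and stripping all its later occurrences from the remaining list (O(n*k) but hash-free); B is slower on large inputs with many distinct concepts.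
import Mathlib
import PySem

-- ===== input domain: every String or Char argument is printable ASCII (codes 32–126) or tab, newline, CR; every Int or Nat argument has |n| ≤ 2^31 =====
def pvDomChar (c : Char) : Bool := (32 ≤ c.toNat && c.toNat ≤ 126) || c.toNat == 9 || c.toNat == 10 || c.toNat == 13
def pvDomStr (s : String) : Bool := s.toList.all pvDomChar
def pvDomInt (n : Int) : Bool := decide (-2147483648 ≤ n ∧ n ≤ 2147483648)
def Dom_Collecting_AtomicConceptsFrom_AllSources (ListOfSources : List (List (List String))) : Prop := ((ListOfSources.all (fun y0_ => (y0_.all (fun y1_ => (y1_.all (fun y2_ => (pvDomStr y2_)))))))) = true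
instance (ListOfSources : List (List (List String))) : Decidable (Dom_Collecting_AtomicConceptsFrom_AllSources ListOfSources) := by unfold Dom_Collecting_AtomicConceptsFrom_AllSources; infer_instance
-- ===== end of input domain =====

-- B flattens with the relation filter inline and deduplicates by recursively stripping the head's
-- later occurrences (no hash container), instead of A's append-all loop followed by dict.fromkeys.

-- ===== PORT A =====
def Collecting_AtomicConceptsFrom_AllSources (ListOfSources : List (List (List String))) : List String :=
  let Relation : List String := ["->", "<-", "="]
  let ListOfAtomicConcepts : List String :=
    ListOfSources.foldl (fun acc eachSource =>
      eachSource.foldl (fun acc eachAxiom =>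
        eachAxiom.foldl (fun acc eachConcept =>
          if eachConcept ∉ Relation then acc ++ [eachConcept] else acc) acc) acc) []
  -- list(dict.fromkeys(...)) is PySem.List.dedup (first occurrences, in order)
  PySem.List.dedup ListOfAtomicConcepts

-- ===== PORT B =====
-- B's recursive dedup: keep the head, strip all its occurrences from the remainder.
def pvUniq : List String → List String
  | [] => []
  | head :: rest => head :: pvUniq (rest.filter (fun x => x != head))
termination_by l => l.length
decreasing_by
  simpa using Nat.lt_succ_of_le (List.length_filter_le _ _)

def Collecting_AtomicConceptsFrom_AllSources_alt (ListOfSources : List (List (List String))) : List String :=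
  let flat : List String :=
    ListOfSources.flatMap (fun src =>
      src.flatMap (fun ax =>
        ax.filter (fun c => c ∉ (["->", "<-", "="] : List String))))
  pvUniq flat

-- ===== PRECONDITION & SPEC =====
def Spec_Collecting_AtomicConceptsFrom_AllSources (ListOfSources : List (List (List String))) (out : List String) : Prop := out = Collecting_AtomicConceptsFrom_AllSources_alt ListOfSources
instance (ListOfSources : List (List (List String))) (out : List String) : Decidable (Spec_Collecting_AtomicConceptsFrom_AllSources ListOfSources out) := by unfold Spec_Collecting_AtomicConceptsFrom_AllSources; infer_instance

-- ===== CLAIM (what is proved, stated in full; the proofs are below) =====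
def Claim_equal_Collecting_AtomicConceptsFrom_AllSources : Prop := ∀ (ListOfSources : List (List (List String))), Dom_Collecting_AtomicConceptsFrom_AllSources ListOfSources → Spec_Collecting_AtomicConceptsFrom_AllSources ListOfSources (Collecting_AtomicConceptsFrom_AllSources ListOfSources)

-- ===== LEMMAS AND PROOFS =====

-- A's nested appending fold equals the filter-inlined double flatMap (B's `flat`).
theorem pvFoldA_eq_flat (L : List (List (List String))) :
    L.foldl (fun acc eachSource =>
      eachSource.foldl (fun acc eachAxiom =>
        eachAxiom.foldl (fun acc eachConcept =>
          if eachConcept ∉ (["->", "<-", "="] : List String) then acc ++ [eachConcept] else acc) acc) acc) []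
    = L.flatMap (fun src => src.flatMap (fun ax =>
        ax.filter (fun c => c ∉ (["->", "<-", "="] : List String)))) := by
  have h1 : ∀ (ax : List String) (acc : List String),
      ax.foldl (fun acc c => if c ∉ (["->", "<-", "="] : List String) then acc ++ [c] else acc) acc
        = acc ++ ax.filter (fun c => c ∉ (["->", "<-", "="] : List String)) :=
    fun ax acc => PySem.List.foldl_append_ite_eq_filter _ _ _
  have h2 : ∀ (src : List (List String)) (acc : List String),
      src.foldl (fun acc ax =>
        ax.foldl (fun acc c => if c ∉ (["->", "<-", "="] : List String) then acc ++ [c] else acc) acc) acc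
        = acc ++ src.flatMap (fun ax => ax.filter (fun c => c ∉ (["->", "<-", "="] : List String))) := by
    intro src acc
    calc _ = src.foldl (fun acc ax => acc ++ ax.filter (fun c => c ∉ (["->", "<-", "="] : List String))) acc := by
            apply PySem.List.foldl_congr_mem; intro acc' ax _; exact h1 ax acc'
      _ = _ := PySem.List.foldl_append_eq_flatMap _ _ _
  calc _ = L.foldl (fun acc src => acc ++ src.flatMap (fun ax => ax.filter (fun c => c ∉ (["->", "<-", "="] : List String)))) [] := by
          apply PySem.List.foldl_congr_mem; intro acc src _; exact h2 src acc
    _ = _ := by rw [PySem.List.foldl_append_eq_flatMap]; simp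

-- A's dedup (foldl Set.add, started from any accumulator) equals the accumulator followed by
-- B's recursive dedup of the not-yet-seen elements.
theorem pvFoldAdd_eq_uniq (l : List String) (acc : List String) :
    List.foldl PySem.Set.add acc l
      = acc ++ pvUniq (l.filter (fun x => !acc.contains x)) := by
  induction l generalizing acc with
  | nil => simp [pvUniq]
  | cons a t ih =>
    by_cases h : a ∈ acc
    · rw [List.foldl_cons, PySem.Set.add_of_mem h, ih acc]
      have hf : (a :: t).filter (fun x => !acc.contains x)
          = t.filter (fun x => !acc.contains x) := by simp [h]
      rw [hf]
    · have hp : t.filter (fun x => !(acc ++ [a]).contains x)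
          = (t.filter (fun x => !acc.contains x)).filter (fun x => x != a) := by
        rw [List.filter_filter]
        apply List.filter_congr
        intro x _
        by_cases hxa : x = a <;> simp [hxa, h, List.mem_append]
      have hf : (a :: t).filter (fun x => !acc.contains x)
          = a :: t.filter (fun x => !acc.contains x) := by simp [h]
      have hu : pvUniq (a :: t.filter (fun x => !acc.contains x))
          = a :: pvUniq ((t.filter (fun x => !acc.contains x)).filter (fun x => x != a)) := by
        simp [pvUniq]
      rw [List.foldl_cons, PySem.Set.add_of_not_mem h, ih (acc ++ [a]), hp, hf, hu]
      simp

-- ===== VERDICT (by name: the statement is the Claim_ definition above) =====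
theorem Collecting_AtomicConceptsFrom_AllSources_spec : Claim_equal_Collecting_AtomicConceptsFrom_AllSources := by
  intro L _
  show Collecting_AtomicConceptsFrom_AllSources L = Collecting_AtomicConceptsFrom_AllSources_alt L
  simp only [Collecting_AtomicConceptsFrom_AllSources, Collecting_AtomicConceptsFrom_AllSources_alt]
  rw [pvFoldA_eq_flat, PySem.List.dedup_eq_ofList, PySem.Set.ofList_eq_foldl, pvFoldAdd_eq_uniq]
  simp
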